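-- pv_equiv track=rewrite | github.com/canfieldjuan/ATLAS | atlas_brain/api/admin_costs.py | _task_name_from_span_name
-- ===== SOURCE A (Python) =====
-- def _task_name_from_span_name(span_name: str, known_task_names: list[str]) -> str | None:
--     normalized = str(span_name or "").strip()
--     if not normalized.startswith("task."):
--         return None
--     for task_name in sorted(known_task_names, key=len, reverse=True):
--         prefix = f"task.{task_name}"
--         if normalized == prefix or normalized.startswith(prefix + "."):
--             return task_name
--     suffix = normalized[len("task."):]
--     return suffix.split(".", 1)[0].strip() or None
-- ===== SOURCE B (Python) =====
-- def _task_name_from_span_name(span_name: str, known_task_names: list[str]) -> str | None: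
--     normalized = str(span_name or "").strip()
--     if not normalized.startswith("task."):
--         return None
--     best = None
--     for task_name in known_task_names:
--         prefix = "task." + task_name
--         if normalized == prefix or normalized.startswith(prefix + "."):
--             if best is None or len(task_name) > len(best):
--                 best = task_name
--     if best is not None:
--         return best
--     head = normalized[len("task."):].split(".", 1)[0].strip()
--     return head or None
-- ===== Notes on version B (the rewrite author's own statement) =====
-- stated objective: simpler
-- what changed: Replaced sorting the task names by length and scanning the sorted list for the first prefix match with a single unsorted pass that keeps the longest-matching task name (strictly-greater update preserves the stable sort's first-occurrence tie-break).
import Mathlib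
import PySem

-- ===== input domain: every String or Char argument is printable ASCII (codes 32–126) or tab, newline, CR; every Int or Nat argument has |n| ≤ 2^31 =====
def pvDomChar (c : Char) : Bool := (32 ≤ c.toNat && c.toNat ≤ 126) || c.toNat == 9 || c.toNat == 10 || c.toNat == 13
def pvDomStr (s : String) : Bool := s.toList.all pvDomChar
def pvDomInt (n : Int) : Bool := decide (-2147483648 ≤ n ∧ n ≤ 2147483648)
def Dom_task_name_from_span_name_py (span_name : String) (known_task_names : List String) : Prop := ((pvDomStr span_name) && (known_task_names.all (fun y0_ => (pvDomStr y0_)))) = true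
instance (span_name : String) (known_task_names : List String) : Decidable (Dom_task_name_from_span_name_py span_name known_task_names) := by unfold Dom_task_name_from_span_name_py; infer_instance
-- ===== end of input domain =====

-- B replaces A's length-sort-then-scan by one unsorted pass keeping the longest matching
-- task name (strictly-greater update = the stable sort's first-occurrence tie-break);
-- objective: simpler (same prefix-match behaviour, no sort).


-- shared by both ports: the match test 'normalized == prefix or normalized.startswith(prefix + ".")'
-- with prefix = "task." + t (identical line in both Python versions)
def pvTaskMatch (normalized t : String) : Bool :=
  normalized == ("task." ++ t) || PySem.Str.startswith normalized (("task." ++ t) ++ ".")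

-- shared by both ports: the fallback 'normalized[len("task."):].split(".", 1)[0].strip() or None'
-- (identical line in both Python versions; the '_ => none' arm is unreachable: sep ≠ "" and split is never empty)
def pvFallback (normalized : String) : Option String :=
  match PySem.Str.splitMax? (PySem.Str.slice normalized (some 5) none) "." 1 with
  | some (p :: _) => let head := PySem.Str.strip p; if head == "" then none else some head
  | _ => none

-- ===== PORT A =====
-- the 'for task_name in sorted(...)' loop: first match wins
def pvALoop (normalized : String) : List String → Option String
  | [] => none
  | t :: rest => if pvTaskMatch normalized t then some t else pvALoop normalized rest

-- 'str(span_name or "")' is span_name itself for a str argument ("" stays "")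
def task_name_from_span_name_py (span_name : String) (known_task_names : List String) : Option String :=
  let normalized := PySem.Str.strip span_name
  if !(PySem.Str.startswith normalized "task.") then none
  else
    match pvALoop normalized (PySem.List.sorted known_task_names (fun t => PySem.Str.len t) true) with
    | some t => some t
    | none => pvFallback normalized

-- ===== PORT B =====
-- one step of B's single pass: keep best only on a strictly longer match
def pvBStep (normalized : String) (best : Option String) (t : String) : Option String :=
  if pvTaskMatch normalized t then
    match best with
    | none => some t
    | some b => if PySem.Str.len b < PySem.Str.len t then some t else some b
  else best

def task_name_from_span_name_py_alt (span_name : String) (known_task_names : List String) : Option String :=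
  let normalized := PySem.Str.strip span_name
  if !(PySem.Str.startswith normalized "task.") then none
  else
    match known_task_names.foldl (pvBStep normalized) none with
    | some b => some b
    | none => pvFallback normalized

-- ===== PRECONDITION & SPEC =====
def Spec_task_name_from_span_name_py (span_name : String) (known_task_names : List String) (out : Option String) : Prop := out = task_name_from_span_name_py_alt span_name known_task_names
instance (span_name : String) (known_task_names : List String) (out : Option String) : Decidable (Spec_task_name_from_span_name_py span_name known_task_names out) := by unfold Spec_task_name_from_span_name_py; infer_instance

-- ===== CLAIM (what is proved, stated in full; the proofs are below) =====
def Claim_equal_task_name_from_span_name_py : Prop := ∀ (span_name : String) (known_task_names : List String), Dom_task_name_from_span_name_py span_name known_task_names → Spec_task_name_from_span_name_py span_name known_task_names (task_name_from_span_name_py span_name known_task_names)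

-- ===== LEMMAS AND PROOFS =====

-- the insertion predicate used by PySem's reverse stable sort with key = len
def pvBef (x y : String) : Bool := decide (PySem.Str.len y < PySem.Str.len x)

theorem pvALoop_mem (n : String) (l : List String) (b : String)
    (h : pvALoop n l = some b) : b ∈ l := by
  induction l with
  | nil => simp [pvALoop] at h
  | cons y ys ih =>
    simp only [pvALoop] at h
    split at h
    · simp_all
    · exact List.mem_cons_of_mem _ (ih h)

theorem pvInsert_pairwise (x : String) (acc : List String)
    (h : acc.Pairwise (fun a b => PySem.Str.len b ≤ PySem.Str.len a)) :
    (PySem.List.insertBy pvBef x acc).Pairwise (fun a b => PySem.Str.len b ≤ PySem.Str.len a) := by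
  induction acc with
  | nil => simp [PySem.List.insertBy]
  | cons y ys ih =>
    rcases List.pairwise_cons.mp h with ⟨hy, hys⟩
    simp only [PySem.List.insertBy]
    by_cases hb : pvBef x y = true
    · simp only [hb, if_true]
      have hxy : PySem.Str.len y < PySem.Str.len x := by simpa [pvBef] using hb
      refine List.pairwise_cons.mpr ⟨?_, h⟩
      intro z hz
      rcases List.mem_cons.mp hz with rfl | hz'
      · exact le_of_lt hxy
      · exact le_trans (hy z hz') (le_of_lt hxy)
    · simp only [hb]
      have hxy : PySem.Str.len x ≤ PySem.Str.len y := by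
        have := (not_iff_not.mpr (show pvBef x y = true ↔ PySem.Str.len y < PySem.Str.len x by simp [pvBef])).mp hb
        omega
      refine List.pairwise_cons.mpr ⟨?_, ih hys⟩
      intro z hz
      rcases (PySem.List.mem_insertBy pvBef x z ys).mp hz with rfl | hz'
      · exact hxy
      · exact hy z hz'

-- inserting x into a length-descending list commutes first-match with B's step
theorem pvALoop_cons (n t : String) (rest : List String) :
    pvALoop n (t :: rest) = if pvTaskMatch n t then some t else pvALoop n rest := rfl

theorem pvALoop_insert (n x : String) (acc : List String)
    (h : acc.Pairwise (fun a b => PySem.Str.len b ≤ PySem.Str.len a)) :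
    pvALoop n (PySem.List.insertBy pvBef x acc) = pvBStep n (pvALoop n acc) x := by
  induction acc with
  | nil => simp [PySem.List.insertBy, pvALoop, pvBStep]
  | cons y ys ih =>
    rcases List.pairwise_cons.mp h with ⟨hy, hys⟩
    simp only [PySem.List.insertBy]
    by_cases hb : pvBef x y = true
    · have hxy : PySem.Str.len y < PySem.Str.len x := by simpa [pvBef] using hb
      rw [if_pos hb, pvALoop_cons]
      by_cases hm : pvTaskMatch n x = true
      · -- x matches: A returns x; B's step replaces any previous (shorter) best by x
        rw [if_pos hm]
        cases hres : pvALoop n (y :: ys) with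
        | none => simp [pvBStep, hm]
        | some b =>
          have hbmem := pvALoop_mem n (y :: ys) b hres
          have hble : PySem.Str.len b ≤ PySem.Str.len y := by
            rcases List.mem_cons.mp hbmem with rfl | hb'
            · exact le_refl _
            · exact hy b hb'
          have hlt : PySem.Str.len b < PySem.Str.len x := lt_of_le_of_lt hble hxy
          simp only [pvBStep, hm, if_true]
          rw [if_pos hlt]
      · rw [if_neg hm]
        cases hres : pvALoop n (y :: ys) with
        | none => simp [pvBStep, hm]
        | some b => simp [pvBStep, hm]
    · have hxy : PySem.Str.len x ≤ PySem.Str.len y := by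
        have := (not_iff_not.mpr (show pvBef x y = true ↔ PySem.Str.len y < PySem.Str.len x by simp [pvBef])).mp hb
        omega
      rw [if_neg hb, pvALoop_cons, pvALoop_cons]
      by_cases hmy : pvTaskMatch n y = true
      · -- y (at least as long as x) matches first in both versions
        rw [if_pos hmy, if_pos hmy]
        show _ = if pvTaskMatch n x = true then (if PySem.Str.len y < PySem.Str.len x then some x else some y) else some y
        by_cases hm : pvTaskMatch n x = true
        · rw [if_pos hm, if_neg (not_lt.mpr hxy)]
        · rw [if_neg hm]
      · rw [if_neg hmy, if_neg hmy]
        exact ih hys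

theorem pvFold_eq (n : String) (l acc : List String)
    (h : acc.Pairwise (fun a b => PySem.Str.len b ≤ PySem.Str.len a)) :
    pvALoop n (l.foldl (fun a x => PySem.List.insertBy pvBef x a) acc)
      = l.foldl (pvBStep n) (pvALoop n acc) := by
  induction l generalizing acc with
  | nil => rfl
  | cons x xs ih =>
    simp only [List.foldl_cons]
    rw [← pvALoop_insert n x acc h]
    exact ih _ (pvInsert_pairwise x acc h)

theorem pvLoop_sorted_eq (n : String) (l : List String) :
    pvALoop n (PySem.List.sorted l (fun t => PySem.Str.len t) true)
      = l.foldl (pvBStep n) none := by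
  rw [PySem.List.sorted_rev_eq_foldl_insertBy]
  have : (fun (acc : List String) x => PySem.List.insertBy (fun a b => decide (PySem.Str.len b < PySem.Str.len a)) x acc)
       = (fun acc x => PySem.List.insertBy pvBef x acc) := rfl
  rw [this]
  simpa [pvALoop] using pvFold_eq n l [] (List.Pairwise.nil)

-- ===== VERDICT (by name: the statement is the Claim_ definition above) =====
theorem task_name_from_span_name_py_spec : Claim_equal_task_name_from_span_name_py := by
  intro span_name known_task_names _
  unfold Spec_task_name_from_span_name_py task_name_from_span_name_py task_name_from_span_name_py_alt
  simp only [pvLoop_sorted_eq]
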